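-- pv_equiv track=rewrite | github.com/EloleMuum/PyInput | advanced_input.py | limit_splice
-- ===== SOURCE A (Python) =====
-- def limit_splice(limit):
--     cache,limitation_list,loci='',[],0
--     for i in range(len(limit)):
--         if limit[i]!='/':
--             cache+=limit[i]
--         else:
--             limitation_list+=['']
--             limitation_list[loci]+=cache
--             cache=''
--             loci+=1
--     return limitation_list
-- ===== SOURCE B (Python) =====
-- def limit_splice(limit):
--     # Two-pass: index all '/' positions, then slice the text between consecutive
--     # delimiters; the tail after the last '/' is never emitted.
--     positions = [i for i, c in enumerate(limit) if c == '/']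
--     prev, out = 0, []
--     for p in positions:
--         out.append(limit[prev:p])
--         prev = p + 1
--     return out
-- ===== Notes on version B (the rewrite author's own statement) =====
-- stated objective: alternative
-- what changed: Replaces the single character-accumulation loop (growing a cache string char by char) with a two-pass scheme: first build an index of all '/' positions, then slice the input between consecutive positions, never emitting the segment after the last '/'.
import Mathlib
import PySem

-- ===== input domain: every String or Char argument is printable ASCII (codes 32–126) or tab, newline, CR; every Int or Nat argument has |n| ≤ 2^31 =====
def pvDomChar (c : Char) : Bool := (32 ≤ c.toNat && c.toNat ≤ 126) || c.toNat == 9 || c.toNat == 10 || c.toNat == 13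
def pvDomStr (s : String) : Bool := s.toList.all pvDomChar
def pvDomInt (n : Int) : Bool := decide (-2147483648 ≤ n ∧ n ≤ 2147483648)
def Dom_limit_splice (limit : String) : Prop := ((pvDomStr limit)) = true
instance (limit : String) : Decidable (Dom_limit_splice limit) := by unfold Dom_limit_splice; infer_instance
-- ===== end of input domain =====

-- B replaces A's char-accumulation loop by a delimiter-position index plus a slicing pass (alternative decomposition, same cost).

-- ===== PORT A =====
-- literal transliteration of A: fold over the characters with state (cache, limitation_list, loci)
def limit_splice (limit : String) : List String :=
  let st := limit.toList.foldl
    (fun (st : String × List String × Nat) c =>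
      let cache := st.1
      let lst := st.2.1
      let loci := st.2.2
      if c ≠ '/' then (cache.push c, lst, loci)
      else
        let l2 := lst ++ [""]
        (("" : String), l2.set loci ((l2.getD loci "") ++ cache), loci + 1))
    ("", [], 0)
  st.2.1

-- ===== PORT B =====
-- literal transliteration of Source B: positions of '/', then slice limit[prev:p] between them
def limit_splice_alt (limit : String) : List String :=
  let s := limit.toList
  let positions := (PySem.List.enumerate s).filterMap
    (fun ic => if ic.2 = '/' then some ic.1 else none)
  let st := positions.foldl
    (fun (st : Int × List String) p =>
      (p + 1, st.2 ++ [String.ofList (PySem.List.slice s (some st.1) (some p))]))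
    (0, [])
  st.2

-- ===== PRECONDITION & SPEC =====
def Spec_limit_splice (limit : String) (out : List String) : Prop := out = limit_splice_alt limit
instance (limit : String) (out : List String) : Decidable (Spec_limit_splice limit out) := by unfold Spec_limit_splice; infer_instance

-- ===== CLAIM (what is proved, stated in full; the proofs are below) =====
def Claim_equal_limit_splice : Prop := ∀ (limit : String), Dom_limit_splice limit → Spec_limit_splice limit (limit_splice limit)

-- ===== LEMMAS AND PROOFS =====

-- reference function: the list of segments before each '/' (trailing segment dropped)
def pvSegs (cache : String) : List Char → List String
  | [] => []
  | c :: t => if c = '/' then cache :: pvSegs "" t else pvSegs (cache.push c) t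

theorem pvSegs_push (l : List Char) (c : Char) :
    (String.ofList l).push c = String.ofList (l ++ [c]) := by
  apply String.toList_inj.mp; simp

-- A's fold, started at loci = lst.length, appends exactly pvSegs cache t
theorem pvFoldA (t : List Char) (cache : String) (lst : List String) :
    (t.foldl
      (fun (st : String × List String × Nat) c =>
        let cache := st.1
        let lst := st.2.1
        let loci := st.2.2
        if c ≠ '/' then (cache.push c, lst, loci)
        else
          let l2 := lst ++ [""]
          (("" : String), l2.set loci ((l2.getD loci "") ++ cache), loci + 1))
      (cache, lst, lst.length)).2.1 = lst ++ pvSegs cache t := by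
  induction t generalizing cache lst with
  | nil => simp [pvSegs]
  | cons c t ih =>
    by_cases h : c = '/'
    · subst h
      have hset : (lst ++ [""]).set lst.length ((lst ++ [""]).getD lst.length "" ++ cache)
          = lst ++ [cache] := by simp [List.getD]
      have hlen : lst.length + 1 = (lst ++ [cache]).length := by simp
      rw [List.foldl_cons]
      simp only [ne_eq, not_true_eq_false, if_false, hset, hlen,
        ih "" (lst ++ [cache])]
      simp [pvSegs]
    · have := ih (cache.push c) lst
      simp only [List.foldl_cons, if_pos h, this, pvSegs, if_neg h]

-- B's fold invariant: prev points after the last emitted '/', d non-slash chars consumed since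
theorem pvFoldB (t : List Char) (s : List Char) (prev d : Nat) (acc : List String)
    (h : s.drop (prev + d) = t) :
    (((PySem.List.enumerate t ((prev + d : Nat) : Int)).filterMap
        (fun ic => if ic.2 = '/' then some ic.1 else none)).foldl
      (fun (st : Int × List String) p =>
        (p + 1, st.2 ++ [String.ofList (PySem.List.slice s (some st.1) (some p))]))
      (((prev : Nat) : Int), acc)).2
    = acc ++ pvSegs (String.ofList ((s.drop prev).take d)) t := by
  induction t generalizing prev d acc with
  | nil => simp [PySem.List.enumerate, pvSegs]
  | cons c t ih =>
    have hdrop : (s.drop prev).drop d = c :: t := by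
      rw [List.drop_drop]; exact h
    by_cases hc : c = '/'
    · subst hc
      have hslice : PySem.List.slice s (some ((prev : Nat) : Int)) (some ((prev + d : Nat) : Int))
          = (s.drop prev).take d := by
        rw [PySem.List.slice_natCast]; simp
      have hnext : s.drop ((prev + d + 1) + 0) = t := by
        have h1 : (s.drop (prev + d)).drop 1 = t := by rw [h]; rfl
        rw [List.drop_drop] at h1
        simpa using h1
      have hstep := ih (prev + d + 1) 0 (acc ++ [String.ofList ((s.drop prev).take d)]) hnext
      simp only [Nat.add_zero, List.take_zero] at hstep
      simp only [PySem.List.enumerate_cons, List.filterMap_cons, reduceIte, List.foldl_cons,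
        hslice]
      rw [show ((prev + d : Nat) : Int) + 1 = ((prev + d + 1 : Nat) : Int) by push_cast; ring,
        hstep]
      simp [pvSegs, show String.ofList ([] : List Char) = "" from rfl]
    · have hnext : s.drop (prev + (d + 1)) = t := by
        have h1 : (s.drop (prev + d)).drop 1 = t := by rw [h]; rfl
        rw [List.drop_drop] at h1
        simpa [Nat.add_assoc] using h1
      have htake : (s.drop prev).take (d + 1) = (s.drop prev).take d ++ [c] := by
        have h2 : (s.drop prev)[d]? = some c := by
          have h3 : ((s.drop prev).drop d)[0]? = (s.drop prev)[d + 0]? := List.getElem?_drop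
          simp [hdrop] at h3; simpa using h3.symm
        simp [List.take_add_one, h2]
      have hstep := ih prev (d + 1) acc hnext
      simp only [PySem.List.enumerate_cons, List.filterMap_cons, if_neg hc]
      rw [show ((prev + d : Nat) : Int) + 1 = ((prev + (d + 1) : Nat) : Int) by push_cast; ring,
        hstep, htake]
      simp only [pvSegs, if_neg hc, pvSegs_push]

theorem limit_splice_spec : Claim_equal_limit_splice := by
  intro limit _
  unfold Spec_limit_splice limit_splice limit_splice_alt
  have hA := pvFoldA limit.toList "" []
  have hB := pvFoldB limit.toList limit.toList 0 0 [] (by simp)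
  simp only [List.length_nil] at hA
  simp only [Nat.add_zero, Nat.cast_zero, List.drop_zero, List.take_zero] at hB
  rw [hA, hB]
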